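-- pv_equiv track=rewrite | github.com/dywzju09-blip/cpg_generator_export | tools/supplychain/archive_analysis_run.py | build_run_readme
-- ===== SOURCE A (Python) =====
-- from collections import Counter
-- from typing import Any
--
-- def build_run_readme(run_name: str, entries: list[dict[str, Any]]) -> str:
--     counts = Counter(item["status"] for item in entries)
--     lines = [
--         f"# {run_name}",
--         "",
--         "该目录保存一次批量检测 run 的汇总文件，路径都已重写到 `VUL/cases/by-analysis-status` 下。",
--         "",
--         "## 状态统计",
--         "",
--     ]
--     for status in sorted(counts):
--         lines.append(f"- `{status}`: {counts[status]}")
--     return "\n".join(lines) + "\n"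
-- ===== SOURCE B (Python) =====
-- from itertools import groupby
--
-- def build_run_readme(run_name: str, entries: list) -> str:
--     body = [f"- `{status}`: {sum(1 for _ in group)}"
--             for status, group in groupby(sorted(item["status"] for item in entries))]
--     header = [
--         f"# {run_name}",
--         "",
--         "该目录保存一次批量检测 run 的汇总文件，路径都已重写到 `VUL/cases/by-analysis-status` 下。",
--         "",
--         "## 状态统计",
--         "",
--     ]
--     return "\n".join(header + body) + "\n"
-- ===== Notes on version B (the rewrite author's own statement) =====
-- stated objective: alternative
-- what changed: Replaces the Counter dict plus sorted-keys loop by sorting the status list once and walking consecutive equal-status runs with itertools.groupby, emitting each run's length.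
import Mathlib
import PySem

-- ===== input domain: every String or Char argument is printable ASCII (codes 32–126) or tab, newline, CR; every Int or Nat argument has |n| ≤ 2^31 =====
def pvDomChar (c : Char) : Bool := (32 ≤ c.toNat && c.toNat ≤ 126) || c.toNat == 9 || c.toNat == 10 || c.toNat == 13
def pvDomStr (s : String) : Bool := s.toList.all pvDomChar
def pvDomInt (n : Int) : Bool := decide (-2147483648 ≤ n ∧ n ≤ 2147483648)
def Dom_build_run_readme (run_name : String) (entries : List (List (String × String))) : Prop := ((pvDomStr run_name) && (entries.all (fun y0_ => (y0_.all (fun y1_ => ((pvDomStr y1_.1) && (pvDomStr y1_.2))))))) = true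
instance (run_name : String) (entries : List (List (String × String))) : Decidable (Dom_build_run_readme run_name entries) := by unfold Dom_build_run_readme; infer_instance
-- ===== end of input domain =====

-- ===== PORT A =====
-- B replaces A's Counter + sorted-keys loop by one sort of the status list and a walk over
-- consecutive equal-status runs (itertools.groupby); same output, same O(n log n) cost.
def build_run_readme (run_name : String) (entries : List (List (String × String))) : String :=
  -- counts = Counter(item["status"] for item in entries)   (Pre_ guarantees every entry has the key)
  let counts := PySem.Dict.counter (entries.map (fun item => (PySem.Dict.mk item).getD "status" ""))
  let lines : List String :=
    ["# " ++ run_name, "",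
     "该目录保存一次批量检测 run 的汇总文件，路径都已重写到 `VUL/cases/by-analysis-status` 下。",
     "", "## 状态统计", ""]
  let lines := (PySem.List.sorted counts.keys (fun s => s) false).foldl
    (fun ls status => ls ++ ["- `" ++ status ++ "`: " ++ PySem.Int.toStr (counts.getD status 0)]) lines
  PySem.Str.join "\n" lines ++ "\n"

-- ===== PORT B =====
-- groupby over a sorted list: emit one line per run of consecutive equal statuses
def pvRunLines : List String → List String
  | [] => []
  | s :: rest =>
    ("- `" ++ s ++ "`: " ++ PySem.Int.toStr (((rest.takeWhile (· == s)).length : Int) + 1))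
      :: pvRunLines (rest.dropWhile (· == s))
termination_by l => l.length
decreasing_by
  exact Nat.lt_succ_of_le (List.length_dropWhile_le _ _)

def build_run_readme_alt (run_name : String) (entries : List (List (String × String))) : String :=
  let body := pvRunLines (PySem.List.sorted
    (entries.map (fun item => (PySem.Dict.mk item).getD "status" "")) (fun s => s) false)
  PySem.Str.join "\n"
    (["# " ++ run_name, "",
      "该目录保存一次批量检测 run 的汇总文件，路径都已重写到 `VUL/cases/by-analysis-status` 下。",
      "", "## 状态统计", ""] ++ body) ++ "\n"

-- ===== PRECONDITION & SPEC =====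
-- Pre_ excludes exactly the entries lacking a "status" key, where Python A raises KeyError.
def Pre_build_run_readme (_run_name : String) (entries : List (List (String × String))) : Prop :=
  (entries.all (fun item => (PySem.Dict.mk item).contains "status")) = true
instance (run_name : String) (entries : List (List (String × String))) : Decidable (Pre_build_run_readme run_name entries) := by unfold Pre_build_run_readme; infer_instance

def pvWitness_build_run_readme : String × (List (List (String × String))) :=
  ("demo-run", [[("status", "ok")], [("status", "fail"), ("path", "x")], [("status", "ok")]])

def Spec_build_run_readme (run_name : String) (entries : List (List (String × String))) (out : String) : Prop := out = build_run_readme_alt run_name entries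
instance (run_name : String) (entries : List (List (String × String))) (out : String) : Decidable (Spec_build_run_readme run_name entries out) := by unfold Spec_build_run_readme; infer_instance

-- ===== CLAIM (what is proved, stated in full; the proofs are below) =====
def Claim_equal_build_run_readme : Prop := ∀ (run_name : String) (entries : List (List (String × String))), Dom_build_run_readme run_name entries → Pre_build_run_readme run_name entries → Spec_build_run_readme run_name entries (build_run_readme run_name entries)

-- ===== LEMMAS AND PROOFS =====

-- core: mapping the line-builder over the strictly increasing list of distinct statuses,
-- with multiplicities read off the ≤-sorted status list, is exactly the run walk pvRunLines
theorem pvRuns_eq (ys zs : List String)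
    (hys : ys.Pairwise (· ≤ ·)) (hp : zs.Perm (PySem.Set.ofList ys))
    (hzs : zs.Pairwise (· < ·)) :
    zs.map (fun s => "- `" ++ s ++ "`: " ++ PySem.Int.toStr ((ys.count s : Int)))
      = pvRunLines ys := by
  induction ys using pvRunLines.induct generalizing zs with
  | case1 =>
    have : zs = [] := by simpa [PySem.Set.ofList] using hp
    simp [this, pvRunLines]
  | case2 s rest IH =>
    set t := rest.takeWhile (· == s) with ht
    set d := rest.dropWhile (· == s) with hd
    have hrest : t ++ d = rest := List.takeWhile_append_dropWhile
    have hle : ∀ x ∈ rest, s ≤ x := (List.pairwise_cons.mp hys).1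
    have hrp : rest.Pairwise (· ≤ ·) := (List.pairwise_cons.mp hys).2
    have hdp : d.Pairwise (· ≤ ·) := List.Pairwise.sublist (List.dropWhile_sublist _) hrp
    have htS : ∀ x ∈ t, x = s := by
      intro x hx
      have hb : (x == s) = true := List.mem_takeWhile_imp (p := fun y => y == s) hx
      exact eq_of_beq hb
    have hsd : ∀ x ∈ d, s < x := by
      intro x hx
      cases hdc : d with
      | nil => exact absurd hx (by rw [hdc]; simp)
      | cons h0 d' =>
        have hdw : rest.dropWhile (· == s) = h0 :: d' := by rw [← hd]; exact hdc
        have hne : rest.dropWhile (· == s) ≠ [] := by rw [hdw]; simp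
        have hph := List.head_dropWhile_not (· == s) hne
        have hh0 : h0 ≠ s := by simpa [hdw] using hph
        have hh0mem : h0 ∈ rest := (List.dropWhile_sublist _).mem (by rw [hdw]; simp)
        have hs0 : s < h0 := lt_of_le_of_ne (hle _ hh0mem) (Ne.symm hh0)
        rw [hdc] at hx
        rcases List.mem_cons.mp hx with rfl | hx'
        · exact hs0
        · exact lt_of_lt_of_le hs0 ((List.pairwise_cons.mp (hdc ▸ hdp)).1 x hx')
    have hsnd : s ∉ d := fun h => lt_irrefl s (hsd s h)
    have hcs : (s :: rest).count s = t.length + 1 := by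
      rw [List.count_cons_self, ← hrest, List.count_append]
      have h1 : t.count s = t.length := List.count_eq_length.mpr (fun b hb => (htS b hb).symm)
      have h2 : d.count s = 0 := List.count_eq_zero.mpr hsnd
      omega
    have hmzs : ∀ x, x ∈ zs ↔ x = s ∨ x ∈ d := by
      intro x
      rw [hp.mem_iff, PySem.Set.mem_ofList, List.mem_cons, ← hrest, List.mem_append]
      constructor
      · rintro (rfl | hx | hx)
        · exact Or.inl rfl
        · exact Or.inl (htS x hx)
        · exact Or.inr hx
      · rintro (rfl | hx)
        · exact Or.inl rfl
        · exact Or.inr (Or.inr hx)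
    obtain ⟨z0, zs', rfl⟩ : ∃ z0 zs', zs = z0 :: zs' := by
      cases zs with
      | nil => exact absurd ((hmzs s).mpr (Or.inl rfl)) (by simp)
      | cons a b => exact ⟨a, b, rfl⟩
    have hz0le : s ≤ z0 := by
      rcases (hmzs z0).mp (by simp) with rfl | hz
      · exact le_refl _
      · exact le_of_lt (hsd _ hz)
    have hz0 : z0 = s := by
      rcases List.mem_cons.mp ((hmzs s).mpr (Or.inl rfl)) with rfl | hs'
      · rfl
      · exact absurd (lt_of_lt_of_le ((List.pairwise_cons.mp hzs).1 s hs') hz0le)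
          (lt_irrefl z0)
    subst hz0
    have hzs' : zs'.Pairwise (· < ·) := (List.pairwise_cons.mp hzs).2
    have hltzs' : ∀ x ∈ zs', z0 < x := (List.pairwise_cons.mp hzs).1
    have hmzs' : ∀ x, x ∈ zs' ↔ x ∈ PySem.Set.ofList d := by
      intro x
      rw [PySem.Set.mem_ofList]
      constructor
      · intro hx
        have hxs : x ≠ z0 := fun h => lt_irrefl z0 (h ▸ hltzs' x hx)
        rcases (hmzs x).mp (List.mem_cons_of_mem _ hx) with rfl | hxd
        · exact absurd rfl hxs
        · exact hxd
      · intro hx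
        rcases List.mem_cons.mp ((hmzs x).mpr (Or.inr hx)) with rfl | h
        · exact absurd (hsd x hx) (lt_irrefl x)
        · exact h
    have hperm' : zs'.Perm (PySem.Set.ofList d) :=
      (List.perm_ext_iff_of_nodup (hzs'.imp ne_of_lt) (PySem.Set.nodup_ofList _)).mpr hmzs'
    have hmapc : zs'.map (fun x => "- `" ++ x ++ "`: " ++ PySem.Int.toStr (((z0 :: rest).count x : Int)))
        = zs'.map (fun x => "- `" ++ x ++ "`: " ++ PySem.Int.toStr ((d.count x : Int))) := by
      apply List.map_congr_left
      intro x hx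
      have hxs : x ≠ z0 := fun h => lt_irrefl z0 (h ▸ hltzs' x hx)
      have ht0 : t.count x = 0 := List.count_eq_zero.mpr (fun hmem => hxs (htS x hmem))
      have : (z0 :: rest).count x = d.count x := by
        rw [← hrest, List.count_cons, List.count_append, ht0]
        simp [Ne.symm hxs]
      rw [this]
    rw [List.map_cons, hcs, hmapc, IH zs' hdp hperm' hzs']
    conv_rhs => rw [pvRunLines]
    push_cast
    rfl

-- ===== VERDICT (by name: the statement is the Claim_ definition above) =====
theorem build_run_readme_spec : Claim_equal_build_run_readme := by
  intro run_name entries _ _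
  unfold Spec_build_run_readme build_run_readme build_run_readme_alt
  simp only
  set xs := entries.map (fun item => (PySem.Dict.mk item).getD "status" "") with hxs
  rw [PySem.List.foldl_append_singleton_eq_map, PySem.Dict.keys_counter]
  congr 2
  have hcnt : ∀ s, (PySem.Dict.counter xs).getD s 0 = ((PySem.List.sorted xs (fun x => x) false).count s : Int) := by
    intro s
    rw [PySem.Dict.getD_counter, (PySem.List.sorted_perm xs (fun x => x) false).count_eq]
  have hmapc : (PySem.List.sorted (PySem.Set.ofList xs) (fun s => s) false).map
      (fun status => "- `" ++ status ++ "`: " ++ PySem.Int.toStr ((PySem.Dict.counter xs).getD status 0))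
    = (PySem.List.sorted (PySem.Set.ofList xs) (fun s => s) false).map
      (fun s => "- `" ++ s ++ "`: " ++ PySem.Int.toStr (((PySem.List.sorted xs (fun x => x) false).count s : Int))) :=
    List.map_congr_left (fun a _ => by rw [hcnt])
  rw [hmapc]
  congr 1
  apply pvRuns_eq
  · have := PySem.List.sorted_pairwise xs (fun x => x)
    simpa using this
  · refine (PySem.List.sorted_perm _ _ _).trans ?_
    refine (List.perm_ext_iff_of_nodup (PySem.Set.nodup_ofList _) (PySem.Set.nodup_ofList _)).mpr ?_
    intro a
    simp [PySem.Set.mem_ofList, PySem.List.mem_sorted]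
  · exact PySem.List.sorted_ofList_pairwise_lt xs
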